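-- pv_equiv track=rewrite | github.com/Saif-Mulla/Resume-Screener-using-OCR | NLPEngine/skill_matcher.py | prefilter_resumes
-- ===== SOURCE A (Python) =====
-- def prefilter_resumes(resume_texts, required_keywords):
--     """
--     Keep only resumes that mention ALL required keywords at least once.
--     """
--     filtered_resumes = []
--     filenames = []
--     for idx, text in enumerate(resume_texts):
--         if all(keyword.lower() in text.lower() for keyword in required_keywords):
--             filtered_resumes.append(text)
--             filenames.append(idx)  # Track which resume index passed
--     return filtered_resumes, filenames
-- ===== SOURCE B (Python) =====
-- def prefilter_resumes(resume_texts, required_keywords):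
--     survivors = list(range(len(resume_texts)))
--     for keyword in required_keywords:
--         kw = keyword.lower()
--         survivors = [i for i in survivors if kw in resume_texts[i].lower()]
--     return [resume_texts[i] for i in survivors], survivors
-- ===== Notes on version B (the rewrite author's own statement) =====
-- stated objective: alternative
-- what changed: Inverted the loop nesting: instead of testing every keyword inside a per-resume pass, B maintains an ordered list of surviving indices that shrinks as each keyword (lowered once) filters it, then rebuilds the texts from the survivors.
import Mathlib
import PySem

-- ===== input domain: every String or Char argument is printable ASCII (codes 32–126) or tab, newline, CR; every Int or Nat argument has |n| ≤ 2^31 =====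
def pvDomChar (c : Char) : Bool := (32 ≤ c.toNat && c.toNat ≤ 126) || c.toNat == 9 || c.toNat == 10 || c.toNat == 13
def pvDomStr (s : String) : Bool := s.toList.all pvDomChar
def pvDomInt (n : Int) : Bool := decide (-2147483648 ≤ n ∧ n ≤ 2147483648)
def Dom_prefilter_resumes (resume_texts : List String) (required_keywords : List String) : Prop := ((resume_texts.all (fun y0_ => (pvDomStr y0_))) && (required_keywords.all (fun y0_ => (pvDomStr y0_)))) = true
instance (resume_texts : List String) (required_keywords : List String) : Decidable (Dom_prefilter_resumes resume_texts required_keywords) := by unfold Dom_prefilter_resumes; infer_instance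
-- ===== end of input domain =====

-- B inverts the loop nesting: an ordered list of surviving indices, shrunk by one filter pass per keyword (lowered once), instead of testing all keywords per resume.
-- ===== PORT A =====
def prefilter_resumes (resume_texts : List String) (required_keywords : List String) : List String × List Int :=
  (PySem.List.enumerate resume_texts 0).foldl
    (fun (acc : List String × List Int) p =>
      if required_keywords.all
          (fun keyword => PySem.Str.isIn (PySem.Str.lower keyword) (PySem.Str.lower p.2)) then
        (acc.1 ++ [p.2], acc.2 ++ [p.1])
      else acc)
    ([], [])

-- ===== PORT B =====
def prefilter_resumes_alt (resume_texts : List String) (required_keywords : List String) : List String × List Int :=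
  let survivors : List Int := required_keywords.foldl
    (fun surv keyword =>
      let kw := PySem.Str.lower keyword
      surv.filter (fun i => PySem.Str.isIn kw (PySem.Str.lower (PySem.List.pyGetD resume_texts i ""))))
    (PySem.List.pyRange 0 (resume_texts.length : Int) 1)
  (survivors.map (fun i => PySem.List.pyGetD resume_texts i ""), survivors)

-- ===== PRECONDITION & SPEC =====
def Spec_prefilter_resumes (resume_texts : List String) (required_keywords : List String) (out : List String × List Int) : Prop := out = prefilter_resumes_alt resume_texts required_keywords
instance (resume_texts : List String) (required_keywords : List String) (out : List String × List Int) : Decidable (Spec_prefilter_resumes resume_texts required_keywords out) := by unfold Spec_prefilter_resumes; infer_instance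

-- ===== CLAIM (what is proved, stated in full; the proofs are below) =====
def Claim_equal_prefilter_resumes : Prop := ∀ (resume_texts : List String) (required_keywords : List String), Dom_prefilter_resumes resume_texts required_keywords → Spec_prefilter_resumes resume_texts required_keywords (prefilter_resumes resume_texts required_keywords)

-- ===== LEMMAS AND PROOFS =====
-- A's loop: appending the passing pairs componentwise IS filter-then-map
theorem pvA_foldl (ks : List String) (l : List (Int × String)) (a : List String) (b : List Int) :
    l.foldl (fun (acc : List String × List Int) p =>
      if ks.all (fun keyword => PySem.Str.isIn (PySem.Str.lower keyword) (PySem.Str.lower p.2)) then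
        (acc.1 ++ [p.2], acc.2 ++ [p.1]) else acc) (a, b)
    = (a ++ ((l.filter (fun p => ks.all (fun keyword => PySem.Str.isIn (PySem.Str.lower keyword) (PySem.Str.lower p.2)))).map (·.2)),
       b ++ ((l.filter (fun p => ks.all (fun keyword => PySem.Str.isIn (PySem.Str.lower keyword) (PySem.Str.lower p.2)))).map (·.1))) := by
  induction l generalizing a b with
  | nil => simp
  | cons x xs ih =>
    simp only [List.foldl_cons, List.filter_cons]
    split_ifs with h <;> rw [ih] <;> simp [List.map_cons]

-- B's loop: iterated filtering IS one filter by the conjunction of all keywords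
theorem pvB_foldl {α : Type} (q : String → α → Bool) (ks : List String) (surv : List α) :
    ks.foldl (fun s k => s.filter (q k)) surv = surv.filter (fun i => ks.all (fun k => q k i)) := by
  induction ks generalizing surv with
  | nil => simp
  | cons k ks ih =>
    simp only [List.foldl_cons, ih, List.filter_filter, List.all_cons]
    congr 1
    funext i
    exact Bool.and_comm _ _

-- ===== VERDICT (by name: the statement is the Claim_ definition above) =====
theorem prefilter_resumes_spec : Claim_equal_prefilter_resumes := by
  intro rs ks _
  unfold Spec_prefilter_resumes prefilter_resumes prefilter_resumes_alt
  rw [pvA_foldl,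
    pvB_foldl (fun k i => PySem.Str.isIn (PySem.Str.lower k) (PySem.Str.lower (PySem.List.pyGetD rs i ""))),
    show PySem.List.enumerate rs 0
        = (PySem.List.pyRange 0 (PySem.List.len rs)).map (fun j => (j, PySem.List.pyGetD rs j ""))
      from PySem.List.enumerate_eq_map_pyRange rs ""]
  simp [List.filter_map, List.map_map, Function.comp_def]
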